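-- pv_equiv track=rewrite | github.com/Qqqq5910/lunwen | analyzer/citation_utils.py | format_numbers
-- ===== SOURCE A (Python) =====
-- def compact_ranges(numbers):
--     ordered = sorted(set(numbers))
--     if not ordered:
--         return []
--     groups = []
--     start = ordered[0]
--     prev = ordered[0]
--     for number in ordered[1:]:
--         if number == prev + 1:
--             prev = number
--         else:
--             groups.append((start, prev))
--             start = number
--             prev = number
--     groups.append((start, prev))
--     return groups
--
-- def bracket_pair(style):
--     if style == "【】":
--         return "【", "】"
--     if style == "〔〕":
--         return "〔", "〕"
--     if style == "［］":
--         return "［", "］"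
--     return "[", "]"
--
-- def format_numbers(numbers, citation_rule=None):
--     rule = citation_rule or {}
--     left, right = bracket_pair(rule.get("bracket_style", "[]"))
--     range_sep = rule.get("range_separator", "~")
--     list_sep = rule.get("list_separator", ",")
--     parts = []
--     for start, end in compact_ranges(numbers):
--         if start == end:
--             parts.append(str(start))
--         else:
--             parts.append(f"{start}{range_sep}{end}")
--     return f"{left}{list_sep.join(parts)}{right}"
-- ===== SOURCE B (Python) =====
-- def format_numbers(numbers, citation_rule=None):
--     rule = citation_rule or {}
--     brackets = {"【】": ("【", "】"), "〔〕": ("〔", "〕"), "［］": ("［", "］")}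
--     left, right = brackets.get(rule.get("bracket_style", "[]"), ("[", "]"))
--     range_sep = rule.get("range_separator", "~")
--     list_sep = rule.get("list_separator", ",")
--     s = set(numbers)
--     starts = sorted(x for x in s if x - 1 not in s)
--     ends = sorted(x for x in s if x + 1 not in s)
--     parts = [str(a) if a == b else f"{a}{range_sep}{b}"
--              for a, b in zip(starts, ends)]
--     return f"{left}{list_sep.join(parts)}{right}"
-- ===== Notes on version B (the rewrite author's own statement) =====
-- stated objective: alternative
-- what changed: B drops the start/prev state machine: it computes run starts (x with x-1 not in the set) and run ends (x with x+1 not in the set) by pure membership tests on the set, sorts each, zips them into the range pairs, and builds the parts by a comprehension instead of an appending loop; the bracket table becomes a dict lookup.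
import Mathlib
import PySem

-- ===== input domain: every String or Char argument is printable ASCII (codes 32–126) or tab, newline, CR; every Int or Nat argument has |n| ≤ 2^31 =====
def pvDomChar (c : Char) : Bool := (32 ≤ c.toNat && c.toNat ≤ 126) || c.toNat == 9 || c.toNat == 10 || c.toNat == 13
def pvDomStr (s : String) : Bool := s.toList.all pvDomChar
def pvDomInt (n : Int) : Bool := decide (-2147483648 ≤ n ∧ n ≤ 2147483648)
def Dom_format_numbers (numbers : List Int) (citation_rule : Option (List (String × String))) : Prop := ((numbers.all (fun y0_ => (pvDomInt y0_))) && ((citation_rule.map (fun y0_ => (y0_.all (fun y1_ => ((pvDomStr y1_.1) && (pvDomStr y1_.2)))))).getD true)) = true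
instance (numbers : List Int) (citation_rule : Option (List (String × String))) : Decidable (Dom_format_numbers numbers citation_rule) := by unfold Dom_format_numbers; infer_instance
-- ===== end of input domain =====

-- B replaces A's start/prev scan with membership-defined run starts and run ends, zipped; same output.

-- ===== PORT A =====
-- rule.get(k, dflt) on the dict argument
def pvRuleGet (rule : List (String × String)) (k dflt : String) : String :=
  (PySem.Dict.ofList rule).getD k dflt

def bracket_pair (style : String) : String × String :=
  if style = "【】" then ("【", "】")
  else if style = "〔〕" then ("〔", "〕")
  else if style = "［］" then ("［", "］")
  else ("[", "]")

def compact_ranges (numbers : List Int) : List (Int × Int) :=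
  let ordered := PySem.List.sorted (PySem.Set.ofList numbers) (fun x => x) false
  match ordered with
  | [] => []
  | h :: t =>
    let st := t.foldl
      (fun (s : List (Int × Int) × Int × Int) n =>
        if n = s.2.2 + 1 then (s.1, s.2.1, n) else (s.1 ++ [(s.2.1, s.2.2)], n, n))
      ([], h, h)
    st.1 ++ [(st.2.1, st.2.2)]

def format_numbers (numbers : List Int) (citation_rule : Option (List (String × String))) : String :=
  let rule := match citation_rule with
    | none => ([] : List (String × String))
    | some r => if r = [] then [] else r
  let lr := bracket_pair (pvRuleGet rule "bracket_style" "[]")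
  let range_sep := pvRuleGet rule "range_separator" "~"
  let list_sep := pvRuleGet rule "list_separator" ","
  let parts := (compact_ranges numbers).foldl
    (fun acc p =>
      acc ++ [if p.1 = p.2 then PySem.Int.toStr p.1
              else PySem.Int.toStr p.1 ++ range_sep ++ PySem.Int.toStr p.2]) []
  lr.1 ++ PySem.Str.join list_sep parts ++ lr.2

-- ===== PORT B =====
def format_numbers_alt (numbers : List Int) (citation_rule : Option (List (String × String))) : String :=
  let rule := match citation_rule with
    | none => ([] : List (String × String))
    | some r => if r = [] then [] else r
  let brackets : PySem.Dict String (String × String) :=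
    PySem.Dict.ofList [("【】", ("【", "】")), ("〔〕", ("〔", "〕")), ("［］", ("［", "］"))]
  let lr := brackets.getD ((PySem.Dict.ofList rule).getD "bracket_style" "[]") ("[", "]")
  let range_sep := (PySem.Dict.ofList rule).getD "range_separator" "~"
  let list_sep := (PySem.Dict.ofList rule).getD "list_separator" ","
  let s : PySem.Set Int := PySem.Set.ofList numbers
  let starts := PySem.List.sorted (s.filter (fun x => !(PySem.Set.contains s (x - 1)))) (fun x => x) false
  let ends := PySem.List.sorted (s.filter (fun x => !(PySem.Set.contains s (x + 1)))) (fun x => x) false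
  let parts := (starts.zip ends).map
    (fun p => if p.1 = p.2 then PySem.Int.toStr p.1
              else PySem.Int.toStr p.1 ++ range_sep ++ PySem.Int.toStr p.2)
  lr.1 ++ PySem.Str.join list_sep parts ++ lr.2

-- ===== PRECONDITION & SPEC =====
def Spec_format_numbers (numbers : List Int) (citation_rule : Option (List (String × String))) (out : String) : Prop := out = format_numbers_alt numbers citation_rule
instance (numbers : List Int) (citation_rule : Option (List (String × String))) (out : String) : Decidable (Spec_format_numbers numbers citation_rule out) := by unfold Spec_format_numbers; infer_instance

-- ===== CLAIM (what is proved, stated in full; the proofs are below) =====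
def Claim_equal_format_numbers : Prop := ∀ (numbers : List Int) (citation_rule : Option (List (String × String))), Dom_format_numbers numbers citation_rule → Spec_format_numbers numbers citation_rule (format_numbers numbers citation_rule)

-- ===== LEMMAS AND PROOFS =====

-- recursive form of A's grouping loop
def pvG (start prev : Int) : List Int → List (Int × Int)
  | [] => [(start, prev)]
  | n :: t => if n = prev + 1 then pvG start n t else (start, prev) :: pvG n n t

theorem pvFoldl_eq_pvG (t : List Int) (acc : List (Int × Int)) (start prev : Int) :
    (t.foldl
      (fun (s : List (Int × Int) × Int × Int) n =>
        if n = s.2.2 + 1 then (s.1, s.2.1, n) else (s.1 ++ [(s.2.1, s.2.2)], n, n))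
      (acc, start, prev)).1
    ++ [((t.foldl
      (fun (s : List (Int × Int) × Int × Int) n =>
        if n = s.2.2 + 1 then (s.1, s.2.1, n) else (s.1 ++ [(s.2.1, s.2.2)], n, n))
      (acc, start, prev)).2.1,
      (t.foldl
      (fun (s : List (Int × Int) × Int × Int) n =>
        if n = s.2.2 + 1 then (s.1, s.2.1, n) else (s.1 ++ [(s.2.1, s.2.2)], n, n))
      (acc, start, prev)).2.2)]
    = acc ++ pvG start prev t := by
  induction t generalizing acc start prev with
  | nil => simp [pvG]
  | cons n t ih =>
    simp only [List.foldl_cons, pvG]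
    by_cases h : n = prev + 1
    · simp only [h]
      exact ih acc start (prev + 1)
    · simp only [if_neg h]
      rw [ih (acc ++ [(start, prev)]) n n]
      simp

-- the heart: zipping membership-defined run starts/ends equals A's scan
theorem pvZip_eq_pvG (s : List Int) :
    ∀ (t : List Int) (start prev : Int),
      prev ∈ s →
      (∀ x ∈ s, prev < x → x ∈ t) →
      (∀ x ∈ t, x ∈ s) →
      (∀ x ∈ t, prev < x) →
      t.Pairwise (· < ·) →
      (start :: t.filter (fun x => !decide ((x - 1) ∈ s))).zip
        ((prev :: t).filter (fun x => !decide ((x + 1) ∈ s)))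
      = pvG start prev t := by
  intro t
  induction t with
  | nil =>
    intro start prev hprev hsub hmem hgt hp
    have h1 : (prev + 1) ∉ s := fun h => by
      have := hsub _ h (by omega); simp at this
    simp [pvG, h1]
  | cons n t ih =>
    intro start prev hprev hsub hmem hgt hp
    have hnprev : prev < n := hgt n (by simp)
    have hns : n ∈ s := hmem n (by simp)
    have hpt : t.Pairwise (· < ·) := hp.of_cons
    have hnt : ∀ x ∈ t, n < x := fun x hx => (List.pairwise_cons.mp hp).1 x hx
    by_cases h : n = prev + 1
    · -- consecutive run: prev+1 ∈ s and n-1 = prev ∈ s, so n opens no run and prev ends none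
      have h1 : (prev + 1) ∈ s := h ▸ hns
      have h2 : (n - 1) ∈ s := by rw [h]; simpa using hprev
      have ihs := ih start n hns
        (fun x hx hlt => by
          rcases List.mem_cons.mp (hsub x hx (by omega)) with he | hx'
          · omega
          · exact hx')
        (fun x hx => hmem x (by simp [hx]))
        hnt hpt
      rw [pvG, if_pos h,
        List.filter_cons_of_neg (by simp [h2]),
        List.filter_cons_of_neg (by simp [h1])]
      exact ihs
    · -- gap before n: prev+1 ∉ s and n-1 ∉ s, so prev closes a run and n opens one
      have h1 : (prev + 1) ∉ s := fun hmem1 => by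
        rcases List.mem_cons.mp (hsub _ hmem1 (by omega)) with he | hx'
        · omega
        · have := hnt _ hx'; omega
      have h2 : (n - 1) ∉ s := fun hmem1 => by
        rcases List.mem_cons.mp (hsub _ hmem1 (by omega)) with he | hx'
        · omega
        · have := hnt _ hx'; omega
      have ihs := ih n n hns
        (fun x hx hlt => by
          rcases List.mem_cons.mp (hsub x hx (by omega)) with he | hx'
          · omega
          · exact hx')
        (fun x hx => hmem x (by simp [hx]))
        hnt hpt
      rw [pvG, if_neg h,
        List.filter_cons_of_pos (by simp [h2]),
        List.filter_cons_of_pos (by simp [h1]),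
        List.zip_cons_cons, ihs]

-- B's dict lookup of the bracket table agrees with A's if-chain
theorem pvBrackets_getD (style : String) :
    (PySem.Dict.ofList [("【】", ("【", "】")), ("〔〕", ("〔", "〕")), ("［］", ("［", "］"))]).getD
      style ("[", "]") = bracket_pair style := by
  have e : (PySem.Dict.ofList [("【】", ("【", "】")), ("〔〕", ("〔", "〕")), ("［］", ("［", "］"))]
      : PySem.Dict String (String × String))
      = ((PySem.Dict.empty.insert "【】" ("【", "】")).insert "〔〕" ("〔", "〕")).insert "［］" ("［", "］") := rfl
  rw [e]
  simp only [PySem.Dict.getD_insert, PySem.Dict.getD_empty, bracket_pair]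
  split_ifs <;> simp_all

-- B's zipped membership-filtered starts/ends equal A's compact_ranges
theorem pvPairs_eq (numbers : List Int) :
    (PySem.List.sorted ((PySem.Set.ofList numbers).filter
        (fun x => !(PySem.Set.contains (PySem.Set.ofList numbers) (x - 1)))) (fun x => x) false).zip
    (PySem.List.sorted ((PySem.Set.ofList numbers).filter
        (fun x => !(PySem.Set.contains (PySem.Set.ofList numbers) (x + 1)))) (fun x => x) false)
    = compact_ranges numbers := by
  unfold compact_ranges
  set s0 := PySem.Set.ofList numbers with hs0
  set s := PySem.List.sorted s0 (fun x => x) false with hs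
  have hperm : s.Perm s0 := PySem.List.sorted_perm s0 (fun x => x) false
  have hpair : s.Pairwise (· < ·) := PySem.List.sorted_ofList_pairwise_lt numbers
  have hcont : ∀ (y : Int), PySem.Set.contains s0 y = decide (y ∈ s) := fun y => by
    by_cases hy : y ∈ s
    · simp [hy, hperm.mem_iff.mp hy]
    · have : y ∉ s0 := fun h => hy (hperm.mem_iff.mpr h)
      simp [hy, this]
  have hsf : ∀ (p : Int → Bool),
      PySem.List.sorted (s0.filter p) (fun x => x) false = s.filter p := fun p =>
    PySem.List.sorted_eq_of_perm_of_pairwise_lt _ _ _ (hperm.filter p) (hpair.filter p)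
  simp only [hcont]
  rw [hsf, hsf]
  cases hc : s with
  | nil => simp
  | cons h t =>
    have hpair' : (h :: t).Pairwise (· < ·) := hc ▸ hpair
    have hht : ∀ x ∈ t, h < x := fun x hx => (List.pairwise_cons.mp hpair').1 x hx
    have hh1 : (h - 1) ∉ (h :: t) := fun hm => by
      rcases List.mem_cons.mp hm with he | hx
      · omega
      · have := hht _ hx; omega
    rw [List.filter_cons_of_pos (by simpa using hh1)]
    rw [pvZip_eq_pvG (h :: t) t h h (by simp)
      (fun x hx hlt => by
        rcases List.mem_cons.mp hx with he | hx'
        · omega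
        · exact hx')
      (fun x hx => by simp [hx])
      hht hpair'.of_cons]
    simpa using (pvFoldl_eq_pvG t [] h h).symm

-- ===== VERDICT (by name: the statement is the Claim_ definition above) =====
theorem format_numbers_spec : Claim_equal_format_numbers := by
  intro numbers citation_rule _
  simp only [Spec_format_numbers, format_numbers, format_numbers_alt, pvRuleGet]
  rw [PySem.List.foldl_append_singleton_eq_map, List.nil_append, pvPairs_eq, pvBrackets_getD]
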